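-- pv_equiv track=rewrite | github.com/genggng/leetcode | 775.全局倒置与局部倒置.py | isIdealPermutation
-- ===== SOURCE A (Python) =====
-- from typing import List
--
-- def isIdealPermutation(nums: List[int]) -> bool:
--     """
--     全局倒置：任意两个元素i<j，nums[i]>nums[j]，降序对
--     局部倒置：相邻两个元素i,i+1,nums[i]>nums[i+1],相邻倒置
--     1. nums中是[0,n-1]一个排列
--     """
--     # 对于每个元素i，在i之后只存在一个元素i+1比其小。
--     # 换句话说，对于元素i，最多只可能i+1比其小，i+1之后的元素都要大于等于i
--     n = len(nums)
--     # 1. 会超时，可以优化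
--     # for i in range(len(nums)-1):
--     #     min_value = min(nums[i+2:]) if i < n-2 else float("inf")
--     #     if nums[i] > min_value:
--     #         return False
--     # return True
--
--     # 2. 优化到O(n)但是还要跑两边，超过25% ,继续优化
--     # min_value = [float("inf")] * (n+1)
--     # for i in range(n-1,-1,-1):
--     #     min_value[i] = min(nums[i],min_value[i+1])
--     # for i in range(len(nums)-1):
--     #     if nums[i] > min_value[i+2]:
--     #         return False
--     # return True
--
--     # 3. 只用跑一边
--     # 226/226 cases passed (132 ms)
--     # Your runtime beats 52.27 % of python3 submissions
--     # Your memory usage beats 69.32 % of python3 submissions (25.1 MB)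
--     min_value = nums[-1]
--     for i in range(n-2,0,-1):
--         if nums[i-1] > min_value:
--             return False
--         min_value = min(min_value,nums[i])
--     return True
-- ===== SOURCE B (Python) =====
-- from typing import List
--
-- def isIdealPermutation(nums: List[int]) -> bool:
--     n = len(nums)
--     # suf[i] = min(nums[i:]) via one reverse in-place pass over a copy
--     suf = nums[:]
--     for i in range(n - 2, -1, -1):
--         if suf[i + 1] < suf[i]:
--             suf[i] = suf[i + 1]
--     # any element exceeding the minimum of everything two positions later?
--     for j in range(n - 2):
--         if nums[j] > suf[j + 2]:
--             return False
--     return True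
-- ===== Notes on version B (the rewrite author's own statement) =====
-- stated objective: alternative
-- what changed: Replaces A's single backward scan with an early-exit running minimum by a two-pass decomposition: build an explicit suffix-minimum array in one reverse pass, then a forward pass comparing nums[j] with suf[j+2].
-- outside the precondition, e.g. on isIdealPermutation([]): A raises IndexError, B returns True
import Mathlib
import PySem

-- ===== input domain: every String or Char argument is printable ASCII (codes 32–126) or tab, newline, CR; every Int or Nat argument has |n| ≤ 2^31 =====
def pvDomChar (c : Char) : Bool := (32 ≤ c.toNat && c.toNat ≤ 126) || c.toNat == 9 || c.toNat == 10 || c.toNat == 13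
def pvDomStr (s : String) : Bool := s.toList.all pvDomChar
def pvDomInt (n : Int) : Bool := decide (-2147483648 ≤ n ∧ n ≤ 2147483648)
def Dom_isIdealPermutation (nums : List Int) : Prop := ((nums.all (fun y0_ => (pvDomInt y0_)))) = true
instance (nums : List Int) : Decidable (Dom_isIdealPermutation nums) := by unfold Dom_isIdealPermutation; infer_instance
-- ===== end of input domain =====

-- B is a two-pass decomposition (explicit suffix-minimum array, then a forward
-- comparison pass) of A's single backward running-minimum scan; equal return
-- values proved on all non-empty lists (A raises IndexError on []).

-- ===== PORT A =====
-- the for-loop 'for i in range(n-2,0,-1)' as recursion on the descending index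
-- (argument i is the current loop index; 0 means the loop is exhausted);
-- the indices i-1 and i are always in range when reached, so getD's default is inert
def pvALoop (nums : List Int) (mv : Int) : Nat → Bool
  | 0 => true
  | Nat.succ a =>
      if nums.getD a 0 > mv then false
      else pvALoop nums (min mv (nums.getD (a + 1) 0)) a

def isIdealPermutation (nums : List Int) : Bool :=
  match PySem.List.pyGet? nums (-1) with
  | none => false            -- Python raises IndexError here (excluded by Pre_)
  | some mv => pvALoop nums mv (nums.length - 2)

-- ===== PORT B =====
-- suf = nums[:] updated backwards with suf[i] = min(suf[i], suf[i+1]),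
-- as structural recursion building the suffix-minimum list back to front
def pvSufMins : List Int → List Int
  | [] => []
  | x :: xs =>
      match pvSufMins xs with
      | [] => [x]
      | m :: ms => min x m :: m :: ms

-- 'for j in range(n-2): if nums[j] > suf[j+2]: return False' — walk nums
-- in step with suf shifted by two (the shorter list ends the loop)
def pvBCheck : List Int → List Int → Bool
  | x :: xs, s :: ss => if x > s then false else pvBCheck xs ss
  | _, _ => true

def isIdealPermutation_alt (nums : List Int) : Bool :=
  pvBCheck nums ((pvSufMins nums).drop 2)

-- ===== PRECONDITION & SPEC =====
-- Pre_ excludes only the empty list, on which A raises IndexError (nums[-1])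
def Pre_isIdealPermutation (nums : List Int) : Prop := nums ≠ []
instance (nums : List Int) : Decidable (Pre_isIdealPermutation nums) := by unfold Pre_isIdealPermutation; infer_instance
def pvWitness_isIdealPermutation : List Int := [1, 0, 2]

def Spec_isIdealPermutation (nums : List Int) (out : Bool) : Prop := out = isIdealPermutation_alt nums
instance (nums : List Int) (out : Bool) : Decidable (Spec_isIdealPermutation nums out) := by unfold Spec_isIdealPermutation; infer_instance

-- ===== CLAIM (what is proved, stated in full; the proofs are below) =====
def Claim_equal_isIdealPermutation : Prop := ∀ (nums : List Int), Dom_isIdealPermutation nums → Pre_isIdealPermutation nums → Spec_isIdealPermutation nums (isIdealPermutation nums)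

-- ===== LEMMAS AND PROOFS =====

-- the common semantic reading of both programs: no element may exceed an
-- element at least two positions to its right
def pvGood (nums : List Int) : Prop :=
  ∀ j k : Nat, j + 2 ≤ k → k < nums.length → nums.getD j 0 ≤ nums.getD k 0

-- ---- A side ----

lemma pvALoop_iff (nums : List Int) :
    ∀ (a : Nat) (mv : Int),
      (pvALoop nums mv a = true ↔
        ∀ i : Nat, 1 ≤ i → i ≤ a →
          nums.getD (i - 1) 0 ≤ mv ∧
          ∀ k : Nat, i + 1 ≤ k → k ≤ a → nums.getD (i - 1) 0 ≤ nums.getD k 0) := by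
  intro a
  induction a with
  | zero =>
      intro mv
      simp only [pvALoop, true_iff]
      intro i h1 h2; omega
  | succ a ih =>
      intro mv
      unfold pvALoop
      by_cases hgt : nums.getD a 0 > mv
      · rw [if_pos hgt]
        constructor
        · intro h; exact absurd h (by simp)
        · intro h
          have := (h (a + 1) (by omega) (le_refl _)).1
          simp only [Nat.add_sub_cancel] at this
          omega
      · rw [if_neg hgt, ih]
        constructor
        · intro h i h1 h2
          rcases Nat.lt_or_ge i (a + 1) with hi | hi
          · have hh := h i h1 (by omega)
            rw [le_min_iff] at hh
            refine ⟨hh.1.1, ?_⟩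
            intro k hk1 hk2
            rcases Nat.lt_or_ge k (a + 1) with hk | hk
            · exact hh.2 k hk1 (by omega)
            · have hke : k = a + 1 := by omega
              subst hke
              exact hh.1.2
          · have hie : i = a + 1 := by omega
            subst hie
            simp only [Nat.add_sub_cancel]
            exact ⟨by omega, fun k hk1 hk2 => by omega⟩
        · intro h i h1 h2
          have hi := h i h1 (by omega)
          refine ⟨le_min hi.1 (hi.2 (a + 1) (by omega) (le_refl _)), ?_⟩
          intro k hk1 hk2
          exact hi.2 k hk1 (by omega)

lemma pvA_iff (nums : List Int) (h : nums ≠ []) :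
    (isIdealPermutation nums = true ↔ pvGood nums) := by
  have hlen : 0 < nums.length := List.length_pos_iff.mpr h
  have hget : PySem.List.pyGet? nums (-1) = some (nums.getD (nums.length - 1) 0) := by
    rw [PySem.List.pyGet?_neg_one, List.getLast?_eq_getElem?,
      List.getElem?_eq_getElem (by omega), List.getD_eq_getElem?_getD,
      List.getElem?_eq_getElem (by omega)]
    rfl
  unfold isIdealPermutation
  rw [hget]
  simp only []
  rw [pvALoop_iff]
  unfold pvGood
  set n := nums.length with hn
  constructor
  · intro hh j k hjk hk
    have hi := hh (j + 1) (by omega) (by omega)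
    simp only [Nat.add_sub_cancel] at hi
    rcases Nat.lt_or_ge k (n - 1) with hk' | hk'
    · exact hi.2 k (by omega) (by omega)
    · have hke : k = n - 1 := by omega
      subst hke
      exact hi.1
  · intro hh i h1 h2
    constructor
    · exact hh (i - 1) (n - 1) (by omega) (by omega)
    · intro k hk1 hk2
      exact hh (i - 1) k (by omega) (by omega)

-- ---- B side ----

lemma pvSufMins_length (xs : List Int) : (pvSufMins xs).length = xs.length := by
  induction xs with
  | nil => simp [pvSufMins]
  | cons x xs ih =>
      unfold pvSufMins
      cases hs : pvSufMins xs with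
      | nil => rw [hs] at ih; simp_all
      | cons m ms => rw [hs] at ih; simp at ih ⊢; omega

lemma pvSufMins_le (xs : List Int) :
    ∀ i k : Nat, i ≤ k → k < xs.length → (pvSufMins xs).getD i 0 ≤ xs.getD k 0 := by
  induction xs with
  | nil => intro i k _ hk; simp at hk
  | cons x xs ih =>
      intro i k hik hk
      unfold pvSufMins
      cases hs : pvSufMins xs with
      | nil =>
          have h0 : xs.length = 0 := by
            have := pvSufMins_length xs; rw [hs] at this; simpa using this.symm
          have hxs : xs = [] := List.length_eq_zero_iff.mp h0
          subst hxs
          simp at hk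
          have hi0 : i = 0 := by omega
          have hk0 : k = 0 := by omega
          subst hi0; subst hk0
          simp
      | cons m ms =>
          cases i with
          | zero =>
              cases k with
              | zero => simp
              | succ k =>
                  simp only [List.getD_cons_succ, List.getD_cons_zero]
                  have hb := ih 0 k (by omega) (by simpa using hk)
                  rw [hs] at hb
                  simp only [List.getD_cons_zero] at hb
                  calc min x m ≤ m := min_le_right _ _
                    _ ≤ xs.getD k 0 := hb
          | succ i =>
              cases k with
              | zero => omega
              | succ k =>
                  simp only [List.getD_cons_succ]
                  have hb := ih i k (by omega) (by simpa using hk)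
                  rw [hs] at hb
                  exact hb

lemma pvSufMins_attained (xs : List Int) :
    ∀ i : Nat, i < xs.length → ∃ k : Nat, i ≤ k ∧ k < xs.length ∧ (pvSufMins xs).getD i 0 = xs.getD k 0 := by
  induction xs with
  | nil => intro i hi; simp at hi
  | cons x xs ih =>
      intro i hi
      unfold pvSufMins
      cases hs : pvSufMins xs with
      | nil =>
          have h0 : xs.length = 0 := by
            have := pvSufMins_length xs; rw [hs] at this; simpa using this.symm
          have hxs : xs = [] := List.length_eq_zero_iff.mp h0
          subst hxs
          simp at hi
          subst hi
          exact ⟨0, le_refl _, by simp, by simp⟩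
      | cons m ms =>
          have hxs : 0 < xs.length := by
            have := pvSufMins_length xs; rw [hs] at this; simp at this; omega
          cases i with
          | zero =>
              rcases le_total x m with hxm | hxm
              · exact ⟨0, le_refl _, by simp, by simp [min_eq_left hxm]⟩
              · obtain ⟨k, hk1, hk2, hk3⟩ := ih 0 hxs
                rw [hs] at hk3
                simp only [List.getD_cons_zero] at hk3
                refine ⟨k + 1, by omega, by simp; omega, ?_⟩
                simp only [List.getD_cons_zero, List.getD_cons_succ]
                rw [min_eq_right hxm, hk3]
          | succ i =>
              obtain ⟨k, hk1, hk2, hk3⟩ := ih i (by simpa using Nat.lt_of_succ_lt_succ hi)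
              rw [hs] at hk3
              refine ⟨k + 1, by omega, by simp; omega, ?_⟩
              simpa using hk3

lemma pvBCheck_iff (xs : List Int) :
    ∀ ss : List Int,
      (pvBCheck xs ss = true ↔
        ∀ j : Nat, j < xs.length → j < ss.length → xs.getD j 0 ≤ ss.getD j 0) := by
  induction xs with
  | nil => intro ss; simp [pvBCheck]
  | cons x xs ih =>
      intro ss
      cases ss with
      | nil => simp [pvBCheck]
      | cons s ss =>
          unfold pvBCheck
          by_cases hgt : x > s
          · rw [if_pos hgt]
            constructor
            · intro hh; exact absurd hh (by simp)
            · intro hh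
              have := hh 0 (by simp) (by simp)
              simp only [List.getD_cons_zero] at this
              omega
          · rw [if_neg hgt, ih]
            constructor
            · intro hh j hj1 hj2
              cases j with
              | zero => simpa using le_of_not_gt hgt
              | succ j =>
                  simp only [List.getD_cons_succ]
                  exact hh j (by simpa using hj1) (by simpa using hj2)
            · intro hh j hj1 hj2
              have := hh (j + 1) (by simpa using hj1) (by simpa using hj2)
              simpa using this

lemma pvDrop_getD (ss : List Int) (j : Nat) : (ss.drop 2).getD j 0 = ss.getD (j + 2) 0 := by
  simp only [List.getD_eq_getElem?_getD, List.getElem?_drop]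
  have : 2 + j = j + 2 := by omega
  rw [this]

lemma pvB_iff (nums : List Int) : (isIdealPermutation_alt nums = true ↔ pvGood nums) := by
  unfold isIdealPermutation_alt
  rw [pvBCheck_iff]
  unfold pvGood
  constructor
  · intro h j k hjk hk
    have hj2 : j < ((pvSufMins nums).drop 2).length := by
      simp [pvSufMins_length]; omega
    have := h j (by omega) hj2
    rw [pvDrop_getD] at this
    calc nums.getD j 0 ≤ (pvSufMins nums).getD (j + 2) 0 := this
      _ ≤ nums.getD k 0 := pvSufMins_le nums (j + 2) k hjk hk
  · intro h j hj1 hj2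
    rw [pvDrop_getD]
    have hj2' : j + 2 < nums.length := by
      simp [pvSufMins_length] at hj2; omega
    obtain ⟨k, hk1, hk2, hk3⟩ := pvSufMins_attained nums (j + 2) hj2'
    rw [hk3]
    exact h j k hk1 hk2

-- ===== VERDICT (by name: the statement is the Claim_ definition above) =====
theorem isIdealPermutation_spec : Claim_equal_isIdealPermutation := by
  intro nums _ hpre
  unfold Spec_isIdealPermutation
  have hA := pvA_iff nums hpre
  have hB := pvB_iff nums
  cases hA' : isIdealPermutation nums <;> cases hB' : isIdealPermutation_alt nums <;> simp_all
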